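-- pv_equiv track=rewrite | github.com/RyanF139/Object_Detection | object-face-detection.py | check_line_cross
-- ===== SOURCE A (Python) =====
-- def point_side_of_line(px, py, x1, y1, x2, y2):
--     return (x2 - x1) * (py - y1) - (y2 - y1) * (px - x1)
--
-- def check_line_cross(history, line_pts, line_in_dir):
--     if len(history) < 2:
--         return None
--     (lx1, ly1), (lx2, ly2) = line_pts
--     sides = [point_side_of_line(px, py, lx1, ly1, lx2, ly2) for px, py in history]
--     last_direction = None
--     for i in range(1, len(sides)):
--         prev, curr = sides[i - 1], sides[i]
--         if prev == 0 or curr == 0: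
--             continue
--         if (prev > 0 and curr > 0) or (prev < 0 and curr < 0):
--             continue
--         crossed_a_to_b = (prev > 0 and curr < 0)
--         if line_in_dir == "A":
--             last_direction = "IN" if crossed_a_to_b else "OUT"
--         else:
--             last_direction = "IN" if not crossed_a_to_b else "OUT"
--     return last_direction
-- ===== SOURCE B (Python) =====
-- def check_line_cross(history, line_pts, line_in_dir):
--     if len(history) < 2:
--         return None
--     (lx1, ly1), (lx2, ly2) = line_pts
--     dir_ab = "IN" if line_in_dir == "A" else "OUT"
--     dir_ba = "OUT" if line_in_dir == "A" else "IN"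
--     def side(p):
--         return (lx2 - lx1) * (p[1] - ly1) - (ly2 - ly1) * (p[0] - lx1)
--     rev = history[::-1]
--     for curr, prev in zip(rev, rev[1:]):
--         s_prev, s_curr = side(prev), side(curr)
--         if s_prev > 0 and s_curr < 0:
--             return dir_ab
--         if s_prev < 0 and s_curr > 0:
--             return dir_ba
--     return None
-- ===== Notes on version B (the rewrite author's own statement) =====
-- stated objective: alternative
-- what changed: Replaced the forward pass that precomputes a sides list and keeps overwriting last_direction with a backward early-exit scan over reversed history that computes the two sides per pair on demand and returns at the first (i.e. last-in-time) genuine sign change.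
import Mathlib
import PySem

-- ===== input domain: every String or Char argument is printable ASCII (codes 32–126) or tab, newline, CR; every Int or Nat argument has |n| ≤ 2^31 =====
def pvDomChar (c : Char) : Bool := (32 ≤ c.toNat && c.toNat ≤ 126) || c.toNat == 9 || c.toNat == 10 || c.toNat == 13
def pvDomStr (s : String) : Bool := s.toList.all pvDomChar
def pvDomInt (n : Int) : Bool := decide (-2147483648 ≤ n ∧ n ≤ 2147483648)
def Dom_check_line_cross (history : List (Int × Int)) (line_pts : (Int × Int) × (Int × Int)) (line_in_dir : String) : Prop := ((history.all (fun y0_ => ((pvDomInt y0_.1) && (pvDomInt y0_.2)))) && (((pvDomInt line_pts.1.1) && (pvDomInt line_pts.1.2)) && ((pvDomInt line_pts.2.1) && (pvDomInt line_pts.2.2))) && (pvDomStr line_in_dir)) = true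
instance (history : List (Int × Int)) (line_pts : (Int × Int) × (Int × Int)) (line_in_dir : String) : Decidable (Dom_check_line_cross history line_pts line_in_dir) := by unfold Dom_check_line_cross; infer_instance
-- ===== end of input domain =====

-- B replaces A's forward overwrite pass over a precomputed sides list by a backward
-- early-exit scan over the reversed history, computing sides on demand (alternative decomposition).

-- ===== PORT A =====
def point_side_of_line (px py x1 y1 x2 y2 : Int) : Int :=
  (x2 - x1) * (py - y1) - (y2 - y1) * (px - x1)

def check_line_cross (history : List (Int × Int)) (line_pts : (Int × Int) × (Int × Int)) (line_in_dir : String) : Option String :=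
  if history.length < 2 then none
  else
    let lx1 := line_pts.1.1; let ly1 := line_pts.1.2
    let lx2 := line_pts.2.1; let ly2 := line_pts.2.2
    let sides := history.map (fun p => point_side_of_line p.1 p.2 lx1 ly1 lx2 ly2)
    (PySem.List.pyRange 1 (sides.length : Int) 1).foldl (fun last i =>
      let prev := PySem.List.pyGetD sides (i - 1) 0
      let curr := PySem.List.pyGetD sides i 0
      if prev = 0 ∨ curr = 0 then last
      else if (prev > 0 ∧ curr > 0) ∨ (prev < 0 ∧ curr < 0) then last
      else
        if line_in_dir = "A" then some (if prev > 0 ∧ curr < 0 then "IN" else "OUT")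
        else some (if ¬ (prev > 0 ∧ curr < 0) then "IN" else "OUT")) none

-- ===== PORT B =====
def clcAux (dAB dBA : String) (side : (Int × Int) → Int) : List (Int × Int) → Option String
  | c :: p :: rest =>
      if side p > 0 ∧ side c < 0 then some dAB
      else if side p < 0 ∧ side c > 0 then some dBA
      else clcAux dAB dBA side (p :: rest)
  | _ => none

def check_line_cross_alt (history : List (Int × Int)) (line_pts : (Int × Int) × (Int × Int)) (line_in_dir : String) : Option String :=
  if history.length < 2 then none
  else
    let lx1 := line_pts.1.1; let ly1 := line_pts.1.2
    let lx2 := line_pts.2.1; let ly2 := line_pts.2.2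
    let dAB := if line_in_dir = "A" then "IN" else "OUT"
    let dBA := if line_in_dir = "A" then "OUT" else "IN"
    clcAux dAB dBA (fun p => (lx2 - lx1) * (p.2 - ly1) - (ly2 - ly1) * (p.1 - lx1)) history.reverse

-- ===== PRECONDITION & SPEC =====
def Spec_check_line_cross (history : List (Int × Int)) (line_pts : (Int × Int) × (Int × Int)) (line_in_dir : String) (out : Option String) : Prop := out = check_line_cross_alt history line_pts line_in_dir
instance (history : List (Int × Int)) (line_pts : (Int × Int) × (Int × Int)) (line_in_dir : String) (out : Option String) : Decidable (Spec_check_line_cross history line_pts line_in_dir out) := by unfold Spec_check_line_cross; infer_instance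

-- ===== CLAIM (what is proved, stated in full; the proofs are below) =====
def Claim_equal_check_line_cross : Prop := ∀ (history : List (Int × Int)) (line_pts : (Int × Int) × (Int × Int)) (line_in_dir : String), Dom_check_line_cross history line_pts line_in_dir → Spec_check_line_cross history line_pts line_in_dir (check_line_cross history line_pts line_in_dir)

-- ===== LEMMAS AND PROOFS =====

/-- Proof-side value of one pair comparison: `some dir` on a genuine sign change, else `none`. -/
def stepOpt (dAB dBA : String) (p c : Int) : Option String :=
  if p > 0 ∧ c < 0 then some dAB else if p < 0 ∧ c > 0 then some dBA else none

/-- Proof-side structural form of A's forward overwrite pass over the sides list. -/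
def fwd (dAB dBA : String) : List Int → Option String → Option String
  | a :: b :: t, acc => fwd dAB dBA (b :: t) ((stepOpt dAB dBA a b).elim acc some)
  | _, acc => acc

theorem branch_eq (dir : String) (prev curr : Int) (acc : Option String) :
    (if prev = 0 ∨ curr = 0 then acc
     else if (prev > 0 ∧ curr > 0) ∨ (prev < 0 ∧ curr < 0) then acc
     else
       if dir = "A" then some (if prev > 0 ∧ curr < 0 then "IN" else "OUT")
       else some (if ¬ (prev > 0 ∧ curr < 0) then "IN" else "OUT"))
    = (stepOpt (if dir = "A" then "IN" else "OUT") (if dir = "A" then "OUT" else "IN") prev curr).elim acc some := by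
  unfold stepOpt
  split_ifs <;> simp_all <;> omega

theorem foldl_range_fwd (dAB dBA : String) (s : List Int) (acc : Option String) :
    (List.range (s.length - 1)).foldl
      (fun acc k => (stepOpt dAB dBA (s.getD k 0) (s.getD (k + 1) 0)).elim acc some) acc
    = fwd dAB dBA s acc := by
  induction s generalizing acc with
  | nil => simp [fwd]
  | cons a t ih =>
    cases t with
    | nil => simp [fwd]
    | cons b t' =>
      simp only [List.length_cons, Nat.add_sub_cancel, List.range_succ_eq_map,
        List.foldl_cons, List.foldl_map, List.getD_cons_zero, List.getD_cons_succ]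
      exact ih _

theorem fwd_snoc (dAB dBA : String) (s : List Int) (x : Int) (acc : Option String) :
    fwd dAB dBA (s ++ [x]) acc
    = (match s.getLast? with
       | none => acc
       | some b => (stepOpt dAB dBA b x).elim (fwd dAB dBA s acc) some) := by
  induction s generalizing acc with
  | nil => simp [fwd]
  | cons a t ih =>
    cases t with
    | nil =>
      simp only [List.cons_append, List.nil_append, fwd, List.getLast?_singleton]
    | cons b t' =>
      simp only [List.cons_append, fwd, List.getLast?_cons_cons]
      exact ih _

theorem foldl_pyRange_fwd (dAB dBA : String) (s : List Int) (acc : Option String) :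
    (PySem.List.pyRange 1 (s.length : Int) 1).foldl
      (fun acc i => (stepOpt dAB dBA (PySem.List.pyGetD s (i - 1) 0) (PySem.List.pyGetD s i 0)).elim acc some) acc
    = fwd dAB dBA s acc := by
  rw [PySem.List.pyRange_one]
  simp only [List.foldl_map]
  have htoNat : ((s.length : Int) - 1).toNat = s.length - 1 := by omega
  rw [htoNat, ← foldl_range_fwd dAB dBA s acc]
  refine PySem.List.foldl_congr_mem _ _ _ _ (fun acc k hk => ?_)
  have h1 : (1 : Int) + (k : Int) - 1 = ((k : Nat) : Int) := by omega
  have h2 : (1 : Int) + (k : Int) = (((k + 1 : Nat)) : Int) := by omega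
  rw [h1, h2, PySem.List.pyGetD_natCast, PySem.List.pyGetD_natCast]

theorem fwd_eq_aux (dAB dBA : String) (f : (Int × Int) → Int) (l : List (Int × Int)) (acc : Option String) :
    fwd dAB dBA (l.map f) acc = (clcAux dAB dBA f l.reverse).elim acc some := by
  induction l using List.reverseRecOn generalizing acc with
  | nil => simp [fwd, clcAux]
  | append_singleton l a ih =>
    rw [List.map_append, List.map_singleton, fwd_snoc, List.reverse_append]
    simp only [List.reverse_singleton, List.singleton_append]
    cases hl : l.reverse with
    | nil =>
      have : l = [] := by simpa using congrArg List.reverse hl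
      subst this
      simp [clcAux]
    | cons p r =>
      have hlast : l.getLast? = some p := by
        rw [← List.head?_reverse, hl]; rfl
      have hmaplast : (l.map f).getLast? = some (f p) := by
        rw [List.getLast?_map, hlast]; rfl
      rw [hmaplast]
      show (stepOpt dAB dBA (f p) (f a)).elim (fwd dAB dBA (l.map f) acc) some
           = (clcAux dAB dBA f (a :: p :: r)).elim acc some
      unfold stepOpt clcAux
      split_ifs with h1 h2
      · rfl
      · rfl
      · rw [Option.elim_none, ih, ← hl]

theorem check_line_cross_eq (history : List (Int × Int)) (line_pts : (Int × Int) × (Int × Int)) (line_in_dir : String) :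
    check_line_cross history line_pts line_in_dir = check_line_cross_alt history line_pts line_in_dir := by
  unfold check_line_cross check_line_cross_alt
  by_cases hlen : history.length < 2
  · simp [hlen]
  · simp only [if_neg hlen]
    set dAB := (if line_in_dir = "A" then "IN" else "OUT") with hdAB
    set dBA := (if line_in_dir = "A" then "OUT" else "IN") with hdBA
    set f : (Int × Int) → Int := fun p =>
      (line_pts.2.1 - line_pts.1.1) * (p.2 - line_pts.1.2)
        - (line_pts.2.2 - line_pts.1.2) * (p.1 - line_pts.1.1) with hf
    set s : List Int := history.map f with hs
    have hside : history.map (fun p => point_side_of_line p.1 p.2 line_pts.1.1 line_pts.1.2 line_pts.2.1 line_pts.2.2) = s := by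
      simp [hs, hf, point_side_of_line]
    have hfun : (fun (last : Option String) (i : Int) =>
        let prev := PySem.List.pyGetD s (i - 1) 0
        let curr := PySem.List.pyGetD s i 0
        if prev = 0 ∨ curr = 0 then last
        else if (prev > 0 ∧ curr > 0) ∨ (prev < 0 ∧ curr < 0) then last
        else
          if line_in_dir = "A" then some (if prev > 0 ∧ curr < 0 then "IN" else "OUT")
          else some (if ¬ (prev > 0 ∧ curr < 0) then "IN" else "OUT"))
        = (fun last i => (stepOpt dAB dBA (PySem.List.pyGetD s (i - 1) 0) (PySem.List.pyGetD s i 0)).elim last some) := by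
      funext last i
      exact branch_eq line_in_dir _ _ last
    rw [hside, hfun, foldl_pyRange_fwd]
    rw [hs, fwd_eq_aux dAB dBA f history none]
    cases clcAux dAB dBA f history.reverse <;> rfl

-- ===== VERDICT (by name: the statement is the Claim_ definition above) =====
theorem check_line_cross_spec : Claim_equal_check_line_cross := by
  intro history line_pts line_in_dir _
  exact check_line_cross_eq history line_pts line_in_dir
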